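-- pv_equiv track=rewrite | github.com/CarlosG18/sys_barbershop | dev/barbershop/agendamento/views.py | gethoras
-- ===== SOURCE A (Python) =====
-- def gethoras(hr_min, hr_max):
--     manha = []
--     tarde = []
--     noite = []
--     for i in range(hr_min, hr_max):
--         if i <= 12:
--             hora = {
--                 "hora": i,
--                 "min": 0,
--             }
--             hora1 = {
--                 "hora": i,
--                 "min": 30,
--             }
--             manha.append(hora)
--             manha.append(hora1)
--         elif i <= 18:
--             hora = {
--                 "hora": i,
--                 "min": 0,
--             }
--             hora1 = {
--                 "hora": i,
--                 "min": 30,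
--             }
--             tarde.append(hora)
--             tarde.append(hora1)
--         else:
--             hora = {
--                 "hora": i,
--                 "min": 0,
--             }
--             hora1 = {
--                 "hora": i,
--                 "min": 30,
--             }
--             noite.append(hora)
--             noite.append(hora1)
--     return (manha,tarde,noite)
-- ===== SOURCE B (Python) =====
-- def gethoras(hr_min, hr_max):
--     manha = [{"hora": i, "min": m} for i in range(hr_min, hr_max) if i <= 12 for m in (0, 30)]
--     tarde = [{"hora": i, "min": m} for i in range(hr_min, hr_max) if 12 < i <= 18 for m in (0, 30)]
--     noite = [{"hora": i, "min": m} for i in range(hr_min, hr_max) if i > 18 for m in (0, 30)]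
--     return (manha, tarde, noite)
-- ===== Notes on version B (the rewrite author's own statement) =====
-- stated objective: simpler
-- what changed: Replaces the single stateful loop with if/elif/else appends by three independent filtered list comprehensions, one per bucket, each scanning the range once.
import Mathlib
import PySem

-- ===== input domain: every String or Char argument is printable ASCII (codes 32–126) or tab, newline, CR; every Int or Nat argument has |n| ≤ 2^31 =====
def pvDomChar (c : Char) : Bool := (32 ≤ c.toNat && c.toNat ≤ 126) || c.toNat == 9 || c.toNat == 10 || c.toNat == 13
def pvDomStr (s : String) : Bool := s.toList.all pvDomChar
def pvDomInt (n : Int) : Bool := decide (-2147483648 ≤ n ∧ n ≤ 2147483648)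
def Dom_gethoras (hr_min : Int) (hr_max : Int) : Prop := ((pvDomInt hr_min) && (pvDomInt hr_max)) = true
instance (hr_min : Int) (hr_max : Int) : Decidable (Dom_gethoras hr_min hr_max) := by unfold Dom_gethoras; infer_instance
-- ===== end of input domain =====

-- ===== PORT A =====
-- One honest line: B replaces A's single branching loop with three filtered comprehensions (simpler decomposition; same cost).
def gethoras (hr_min : Int) (hr_max : Int) : (List (List (String × Int))) × (List (List (String × Int))) × (List (List (String × Int))) :=
  ((PySem.List.pyRange hr_min hr_max 1).foldl
    (fun (st : (List (List (String × Int))) × (List (List (String × Int))) × (List (List (String × Int)))) i =>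
      let hora : List (String × Int) := [("hora", i), ("min", 0)]
      let hora1 : List (String × Int) := [("hora", i), ("min", 30)]
      if i ≤ 12 then (st.1 ++ [hora, hora1], st.2.1, st.2.2)
      else if i ≤ 18 then (st.1, st.2.1 ++ [hora, hora1], st.2.2)
      else (st.1, st.2.1, st.2.2 ++ [hora, hora1]))
    ([], [], []))

-- ===== PORT B =====
-- B-side helper: one bucket = filter the range by the bucket predicate, emit the two dicts per hour.
def gethorasBucket (lo : Int) (hi : Int) (p : Int → Bool) : List (List (String × Int)) :=
  ((PySem.List.pyRange lo hi 1).filter p).flatMap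
    (fun i => [0, 30].map (fun m => [("hora", i), ("min", m)]))

def gethoras_alt (hr_min : Int) (hr_max : Int) : (List (List (String × Int))) × (List (List (String × Int))) × (List (List (String × Int))) :=
  (gethorasBucket hr_min hr_max (fun i => decide (i ≤ 12)),
   gethorasBucket hr_min hr_max (fun i => decide (12 < i) && decide (i ≤ 18)),
   gethorasBucket hr_min hr_max (fun i => decide (18 < i)))

-- ===== PRECONDITION & SPEC =====
def Spec_gethoras (hr_min : Int) (hr_max : Int) (out : (List (List (String × Int))) × (List (List (String × Int))) × (List (List (String × Int)))) : Prop := out = gethoras_alt hr_min hr_max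
instance (hr_min : Int) (hr_max : Int) (out : (List (List (String × Int))) × (List (List (String × Int))) × (List (List (String × Int)))) : Decidable (Spec_gethoras hr_min hr_max out) := by unfold Spec_gethoras; infer_instance

-- ===== CLAIM (what is proved, stated in full; the proofs are below) =====
def Claim_equal_gethoras : Prop := ∀ (hr_min : Int) (hr_max : Int), Dom_gethoras hr_min hr_max → Spec_gethoras hr_min hr_max (gethoras hr_min hr_max)

-- ===== LEMMAS AND PROOFS =====
def gethorasEmit (i : Int) : List (List (String × Int)) :=
  [0, 30].map (fun m => [("hora", i), ("min", m)])

theorem gethoras_fold_eq (l : List Int)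
    (a b c : List (List (String × Int))) :
    l.foldl
      (fun (st : (List (List (String × Int))) × (List (List (String × Int))) × (List (List (String × Int)))) i =>
        let hora : List (String × Int) := [("hora", i), ("min", 0)]
        let hora1 : List (String × Int) := [("hora", i), ("min", 30)]
        if i ≤ 12 then (st.1 ++ [hora, hora1], st.2.1, st.2.2)
        else if i ≤ 18 then (st.1, st.2.1 ++ [hora, hora1], st.2.2)
        else (st.1, st.2.1, st.2.2 ++ [hora, hora1]))
      (a, b, c)
    = (a ++ (l.filter (fun i => decide (i ≤ 12))).flatMap gethorasEmit,
       b ++ (l.filter (fun i => decide (12 < i) && decide (i ≤ 18))).flatMap gethorasEmit,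
       c ++ (l.filter (fun i => decide (18 < i))).flatMap gethorasEmit) := by
  induction l generalizing a b c with
  | nil => simp
  | cons x tl ih =>
    by_cases h1 : x ≤ 12
    · simp only [List.foldl_cons, List.filter_cons, if_pos h1]
      rw [ih]
      have h2 : ¬ (12 < x) := by omega
      have h3 : ¬ (18 < x) := by omega
      simp [h1, h2, h3, gethorasEmit]
    · by_cases h2 : x ≤ 18
      · simp only [List.foldl_cons, List.filter_cons, if_neg h1, if_pos h2]
        rw [ih]
        have h3 : 12 < x := by omega
        have h4 : ¬ (18 < x) := by omega
        simp [h1, h2, h3, h4, gethorasEmit]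
      · simp only [List.foldl_cons, List.filter_cons, if_neg h1, if_neg h2]
        rw [ih]
        have h3 : 18 < x := by omega
        simp [h1, h2, h3, gethorasEmit]

-- ===== VERDICT (by name: the statement is the Claim_ definition above) =====
theorem gethoras_spec : Claim_equal_gethoras := by
  intro hr_min hr_max _
  show gethoras hr_min hr_max = gethoras_alt hr_min hr_max
  unfold gethoras gethoras_alt gethorasBucket
  rw [gethoras_fold_eq]
  rfl
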